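-- pv_equiv track=rewrite | github.com/ziv1010/NLP_FINAL_PROJECT | src/reddit_worldnews_trump/topics.py | _rule_based_label
-- ===== SOURCE A (Python) =====
-- def _normalize_token(token: str) -> str:
--     token = token.strip().lower()
--     if len(token) > 4 and token.endswith("ies"):
--         return f"{token[:-3]}y"
--     if len(token) > 3 and token.endswith("s") and not token.endswith(("ss", "us", "is", "ses")):
--         return token[:-1]
--     return token
--
-- def _normalize_keyword(keyword: str) -> str:
--     pieces = [_normalize_token(piece) for piece in keyword.split() if piece.strip()]
--     return " ".join(pieces)
--
-- def _rule_based_label(keywords: list[str]) -> str | None: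
--     keyword_set = {_normalize_keyword(keyword) for keyword in keywords if keyword}
--     if "data center" in keyword_set or ({"data", "center"} <= keyword_set):
--         return "Data Centers"
--     if "social media" in keyword_set and "ban" in keyword_set:
--         return "Social Media Regulation"
--     if "elon musk" in keyword_set or ("musk" in keyword_set and ({"tesla", "grok", "xai"} & keyword_set)):
--         return "Elon Musk / xAI"
--     if "ai" in keyword_set and {"job", "human", "future", "study", "work"} & keyword_set:
--         return "AI / Work and Society"
--     if "openai" in keyword_set and {"anthropic", "chatgpt", "claude"} & keyword_set:
--         return "OpenAI / Anthropic"
--     if "google" in keyword_set and {"gemini", "android", "search"} & keyword_set: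
--         return "Google / Gemini"
--     if "microsoft" in keyword_set and {"window", "copilot", "pc"} & keyword_set:
--         return "Microsoft / Windows"
--     if "china" in keyword_set and {"chip", "nvidia", "power"} & keyword_set:
--         return "China / AI Chips"
--     if "apple" in keyword_set and {"app", "app store", "tiktok", "ice", "store"} & keyword_set:
--         return "Apps / Platform Moderation"
--     if "meta" in keyword_set and {"smart glasses", "glasses"} & keyword_set:
--         return "Meta / Smart Glasses"
--     if "anthropic" in keyword_set and {"pentagon", "claude"} & keyword_set:
--         return "Anthropic / AI Safety"
--     return None
-- ===== SOURCE B (Python) =====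
-- def _normalize_token(token: str) -> str:
--     token = token.strip().lower()
--     if len(token) > 4 and token.endswith("ies"):
--         return f"{token[:-3]}y"
--     if len(token) > 3 and token.endswith("s") and not token.endswith(("ss", "us", "is", "ses")):
--         return token[:-1]
--     return token
--
-- def _normalize_keyword(keyword: str) -> str:
--     pieces = [_normalize_token(piece) for piece in keyword.split() if piece.strip()]
--     return " ".join(pieces)
--
-- # Ordered rule table: (required keywords, any-of keywords, label).  A rule fires when
-- # every required keyword is present and (the any-of list is empty or one of it is present).
-- # The two OR-shaped rules of the original become two consecutive rows with the same label.
-- _RULES = [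
--     (("data center",), (), "Data Centers"),
--     (("data", "center"), (), "Data Centers"),
--     (("social media", "ban"), (), "Social Media Regulation"),
--     (("elon musk",), (), "Elon Musk / xAI"),
--     (("musk",), ("tesla", "grok", "xai"), "Elon Musk / xAI"),
--     (("ai",), ("job", "human", "future", "study", "work"), "AI / Work and Society"),
--     (("openai",), ("anthropic", "chatgpt", "claude"), "OpenAI / Anthropic"),
--     (("google",), ("gemini", "android", "search"), "Google / Gemini"),
--     (("microsoft",), ("window", "copilot", "pc"), "Microsoft / Windows"),
--     (("china",), ("chip", "nvidia", "power"), "China / AI Chips"),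
--     (("apple",), ("app", "app store", "tiktok", "ice", "store"), "Apps / Platform Moderation"),
--     (("meta",), ("smart glasses", "glasses"), "Meta / Smart Glasses"),
--     (("anthropic",), ("pentagon", "claude"), "Anthropic / AI Safety"),
-- ]
--
-- def _rule_based_label(keywords: list[str]) -> str | None:
--     keyword_set = {_normalize_keyword(keyword) for keyword in keywords if keyword}
--     for required, any_of, label in _RULES:
--         if all(r in keyword_set for r in required) and (not any_of or any(a in keyword_set for a in any_of)):
--             return label
--     return None
-- ===== Notes on version B (the rewrite author's own statement) =====
-- stated objective: simpler
-- what changed: Replaces the hand-written chain of eleven if-statements by a single first-match scan over an ordered data table of (required, any_of, label) rules, with the two OR-shaped rules encoded as two consecutive rows.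
import Mathlib
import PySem

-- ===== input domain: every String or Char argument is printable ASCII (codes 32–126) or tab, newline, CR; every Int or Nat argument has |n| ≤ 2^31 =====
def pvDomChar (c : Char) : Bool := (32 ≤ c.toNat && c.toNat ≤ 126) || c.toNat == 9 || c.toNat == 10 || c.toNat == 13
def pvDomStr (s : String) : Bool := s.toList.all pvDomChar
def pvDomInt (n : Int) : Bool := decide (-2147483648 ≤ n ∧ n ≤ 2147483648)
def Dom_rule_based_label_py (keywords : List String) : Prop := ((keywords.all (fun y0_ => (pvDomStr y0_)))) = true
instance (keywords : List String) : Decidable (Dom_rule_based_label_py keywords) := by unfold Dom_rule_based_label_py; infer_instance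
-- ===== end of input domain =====

-- B replaces the original's hand-written chain of eleven if-statements by a single first-match
-- scan over an ordered data table of (required, any-of, label) rules (objective: simpler).
-- The two normalization helpers are unchanged and shared by both ports.

-- ===== PORT A =====
-- _normalize_token (shared helper, identical in A and B)
def pvNormToken (token : String) : String :=
  let t := PySem.Str.lower (PySem.Str.strip token)
  if PySem.Str.len t > 4 && PySem.Str.endswith t "ies" then
    -- f"{token[:-3]}y": String.append is exact for concatenation
    PySem.Str.slice t none (some (-3)) ++ "y"
  else if PySem.Str.len t > 3 && PySem.Str.endswith t "s" &&
      !(PySem.Str.endswith t "ss" || PySem.Str.endswith t "us" ||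
        PySem.Str.endswith t "is" || PySem.Str.endswith t "ses") then
    PySem.Str.slice t none (some (-1))
  else t

-- _normalize_keyword (shared helper, identical in A and B)
def pvNormKeyword (keyword : String) : String :=
  let pieces := ((PySem.Str.split₀ keyword).filter
      (fun piece => PySem.Str.strip piece != "")).map pvNormToken
  PySem.Str.join " " pieces

-- the set comprehension {_normalize_keyword(k) for k in keywords if k} (shared: identical line in A and B)
def pvKeywordSet (keywords : List String) : PySem.Set String :=
  PySem.Set.ofList ((keywords.filter (fun k => k != "")).map pvNormKeyword)

-- A's chain of if-statements on the keyword set (Python set literals ported as their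
-- distinct-element lists, which is exactly the PySem.Set they denote; `{…} & s` in boolean
-- context is nonemptiness of the intersection)
def pvChain (s : PySem.Set String) : Option String :=
  if s.contains "data center" || PySem.Set.issubset ["data", "center"] s then
    some "Data Centers"
  else if s.contains "social media" && s.contains "ban" then
    some "Social Media Regulation"
  else if s.contains "elon musk" ||
      (s.contains "musk" && !(PySem.Set.inter ["tesla", "grok", "xai"] s).isEmpty) then
    some "Elon Musk / xAI"
  else if s.contains "ai" &&
      !(PySem.Set.inter ["job", "human", "future", "study", "work"] s).isEmpty then
    some "AI / Work and Society"
  else if s.contains "openai" &&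
      !(PySem.Set.inter ["anthropic", "chatgpt", "claude"] s).isEmpty then
    some "OpenAI / Anthropic"
  else if s.contains "google" &&
      !(PySem.Set.inter ["gemini", "android", "search"] s).isEmpty then
    some "Google / Gemini"
  else if s.contains "microsoft" &&
      !(PySem.Set.inter ["window", "copilot", "pc"] s).isEmpty then
    some "Microsoft / Windows"
  else if s.contains "china" &&
      !(PySem.Set.inter ["chip", "nvidia", "power"] s).isEmpty then
    some "China / AI Chips"
  else if s.contains "apple" &&
      !(PySem.Set.inter ["app", "app store", "tiktok", "ice", "store"] s).isEmpty then
    some "Apps / Platform Moderation"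
  else if s.contains "meta" &&
      !(PySem.Set.inter ["smart glasses", "glasses"] s).isEmpty then
    some "Meta / Smart Glasses"
  else if s.contains "anthropic" &&
      !(PySem.Set.inter ["pentagon", "claude"] s).isEmpty then
    some "Anthropic / AI Safety"
  else none

def rule_based_label_py (keywords : List String) : Option String :=
  pvChain (pvKeywordSet keywords)

-- ===== PORT B =====
-- the ordered rule table _RULES of Source B
def pvRules : List (List String × List String × String) :=
  [ (["data center"], [], "Data Centers"),
    (["data", "center"], [], "Data Centers"),
    (["social media", "ban"], [], "Social Media Regulation"),
    (["elon musk"], [], "Elon Musk / xAI"),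
    (["musk"], ["tesla", "grok", "xai"], "Elon Musk / xAI"),
    (["ai"], ["job", "human", "future", "study", "work"], "AI / Work and Society"),
    (["openai"], ["anthropic", "chatgpt", "claude"], "OpenAI / Anthropic"),
    (["google"], ["gemini", "android", "search"], "Google / Gemini"),
    (["microsoft"], ["window", "copilot", "pc"], "Microsoft / Windows"),
    (["china"], ["chip", "nvidia", "power"], "China / AI Chips"),
    (["apple"], ["app", "app store", "tiktok", "ice", "store"], "Apps / Platform Moderation"),
    (["meta"], ["smart glasses", "glasses"], "Meta / Smart Glasses"),
    (["anthropic"], ["pentagon", "claude"], "Anthropic / AI Safety") ]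

-- the 'for required, any_of, label in _RULES: …' loop of Source B (first match wins)
def pvScan (rules : List (List String × List String × String)) (s : PySem.Set String) :
    Option String :=
  match rules with
  | [] => none
  | (required, any_of, label) :: rest =>
    if (required.all fun r => s.contains r) &&
        (any_of.isEmpty || any_of.any fun a => s.contains a) then some label
    else pvScan rest s

def rule_based_label_py_alt (keywords : List String) : Option String :=
  pvScan pvRules (pvKeywordSet keywords)

-- ===== PRECONDITION & SPEC =====
def Spec_rule_based_label_py (keywords : List String) (out : Option String) : Prop := out = rule_based_label_py_alt keywords
instance (keywords : List String) (out : Option String) : Decidable (Spec_rule_based_label_py keywords out) := by unfold Spec_rule_based_label_py; infer_instance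

-- ===== CLAIM (what is proved, stated in full; the proofs are below) =====
def Claim_equal_rule_based_label_py : Prop := ∀ (keywords : List String), Dom_rule_based_label_py keywords → Spec_rule_based_label_py keywords (rule_based_label_py keywords)

-- ===== LEMMAS AND PROOFS =====

-- a nonempty intersection with a literal set, as an existential over the literal
theorem inter_ne_nil (l s : List String) :
    (¬ PySem.Set.inter l s = []) ↔ ∃ x ∈ l, x ∈ s := by
  simp [PySem.Set.inter, PySem.Set.contains, List.filter_eq_nil_iff]

-- an if on a disjunction is two consecutive table rows with the same result
theorem pv_if_or {α : Type} (a b : Prop) [Decidable a] [Decidable b] (x y : α) :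
    (if a ∨ b then x else y) = if a then x else if b then x else y := by
  by_cases a <;> by_cases b <;> simp [*]

-- the table scan computes A's if-chain on every keyword set
theorem scan_eq_chain (s : PySem.Set String) : pvScan pvRules s = pvChain s := by
  simp only [pvScan, pvRules, pvChain]
  simp [inter_ne_nil, pv_if_or]

-- ===== VERDICT (by name: the statement is the Claim_ definition above) =====
theorem rule_based_label_py_spec : Claim_equal_rule_based_label_py := by
  intro keywords _
  unfold Spec_rule_based_label_py rule_based_label_py rule_based_label_py_alt
  exact (scan_eq_chain _).symm
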